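-- pv_equiv track=rewrite | github.com/GiWoonHwang/Coding-test | cote/test2.py | getServerIndex
-- ===== SOURCE A (Python) =====
-- def getServerIndex(n, arrival, burstTime):
--     # 서버의 상태를 추적할 리스트, 각 서버가 다음 요청을 처리할 수 있는 시간을 저장
--     servers = [0] * n
--     # 각 요청이 할당된 서버의 인덱스를 저장할 리스트
--     assigned_servers = []
--
--     for i in range(len(arrival)):
--         # 현재 요청이 도착한 시간
--         current_time = arrival[i]
--         # 현재 요청을 할당할 수 있는 서버의 인덱스를 -1로 초기화 (할당 불가능 상태)
--         assigned_server = -1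
--
--         # 모든 서버를 순회하며 요청을 할당할 수 있는 서버 탐색
--         for j in range(n):
--             # 만약 현재 서버가 요청을 수락할 수 있다면
--             if servers[j] <= current_time:
--                 # 해당 서버에 요청을 할당하고 반복 중단
--                 assigned_server = j
--                 servers[j] = current_time + burstTime[i]  # 서버가 다음 요청을 수락할 수 있는 시간 업데이트
--                 break
--
--         # 할당된 서버 인덱스를 결과 리스트에 추가 (할당되지 않았다면 -1이 추가됨)
--         assigned_servers.append(assigned_server)
--
--     # 할당된 서버의 인덱스 리스트 반환
--     return assigned_servers
--
-- n = 3  # 서버 수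
--
-- arrival = [2, 4, 1, 8, 9]  # 각 요청의 도착 시간
--
-- burstTime = [7, 9, 2, 4, 5]  # 각 요청의 처리 시간
-- ===== SOURCE B (Python) =====
-- # Segment tree over server free-times: find the leftmost free server by a
-- # O(log n) tree descent and point-update it, instead of scanning all n servers.
-- # burstTime[i] is read only when a server is actually assigned, exactly as in A.
--
-- def _build(sz):
--     if sz <= 1:
--         return (0,)                      # leaf: server free at time 0
--     half = sz // 2
--     return (sz, 0, _build(half), _build(sz - half))
--
-- def _min(nd):
--     return nd[0] if len(nd) == 1 else nd[1]
--
-- def _size(nd):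
--     return 1 if len(nd) == 1 else nd[0]
--
-- def _query(nd, t):
--     # leftmost leaf index with value <= t, or None
--     if _min(nd) > t:
--         return None
--     if len(nd) == 1:
--         return 0
--     _, _, l, r = nd
--     res = _query(l, t)
--     if res is not None:
--         return res
--     res = _query(r, t)
--     if res is None:
--         return None
--     return res + _size(l)
--
-- def _update(nd, idx, v):
--     # point-update leaf idx to value v, recomputing the mins on the path
--     if len(nd) == 1:
--         return (v,)
--     sz, _, l, r = nd
--     if idx < _size(l):
--         l = _update(l, idx, v)
--     else:
--         r = _update(r, idx - _size(l), v)
--     return (sz, min(_min(l), _min(r)), l, r)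
--
-- def getServerIndex(n, arrival, burstTime):
--     if n <= 0:
--         return [-1] * len(arrival)
--     tree = _build(n)
--     out = []
--     for i in range(len(arrival)):
--         j = _query(tree, arrival[i])
--         if j is None:
--             out.append(-1)
--         else:
--             tree = _update(tree, j, arrival[i] + burstTime[i])
--             out.append(j)
--     return out
-- ===== Notes on version B (the rewrite author's own statement) =====
-- stated objective: faster
-- what changed: Replaces the inner linear scan over all n servers with a segment tree of minimum free-times: an O(log n) descent finds the leftmost free server and a point update sets its new free-time.
-- outside the precondition, e.g. on getServerIndex(1, [-1], []): A returns [-1], B returns [-1]; on getServerIndex(1, [0, 0], [1]): A returns [0, -1], B returns [0, -1]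
import Mathlib
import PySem

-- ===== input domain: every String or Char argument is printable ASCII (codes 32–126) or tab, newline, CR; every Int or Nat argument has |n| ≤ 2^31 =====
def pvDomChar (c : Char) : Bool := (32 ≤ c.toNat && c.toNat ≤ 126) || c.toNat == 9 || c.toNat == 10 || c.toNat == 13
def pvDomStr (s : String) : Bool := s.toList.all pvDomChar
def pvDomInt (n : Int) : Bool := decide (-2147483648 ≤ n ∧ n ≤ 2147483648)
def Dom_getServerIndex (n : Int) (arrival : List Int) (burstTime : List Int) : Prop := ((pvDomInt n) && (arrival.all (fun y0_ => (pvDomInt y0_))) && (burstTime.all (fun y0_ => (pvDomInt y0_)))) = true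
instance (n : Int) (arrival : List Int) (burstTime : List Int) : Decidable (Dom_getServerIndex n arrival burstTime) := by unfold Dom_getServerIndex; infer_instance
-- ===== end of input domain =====

-- B replaces A's linear scan over all n servers with a segment tree of minimum
-- free-times (leftmost-free-leaf query + point update), for speed.
-- Neither program mutates its arguments.

-- ===== PORT A =====
-- inner 'for j in range(n): if servers[j] <= current_time: ... break'
-- returns (assigned_server, updated servers); j carries the running index.
def innerA (servers : List Int) (t b : Int) (j : Int) : Int × List Int :=
  match servers with
  | [] => (-1, [])
  | s :: rest =>
    if s ≤ t then (j, (t + b) :: rest)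
    else
      let p := innerA rest t b (j + 1)
      (p.1, s :: p.2)

-- outer 'for i in range(len(arrival))'; burstTime[i] is read via pyGet?, totalised
-- with getD 0 (under Pre_ the index is in range whenever the value is used, so the
-- default is never observable there).
def loopA (servers : List Int) (arrival : List Int) (burstTime : List Int) (i : Nat) : List Int :=
  match arrival with
  | [] => []
  | t :: rest =>
    let b := (PySem.List.pyGet? burstTime (Int.ofNat i)).getD 0
    let p := innerA servers t b 0
    p.1 :: loopA p.2 rest burstTime (i + 1)

def getServerIndex (n : Int) (arrival : List Int) (burstTime : List Int) : List Int :=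
  loopA (List.replicate n.toNat 0) arrival burstTime 0

-- ===== PORT B =====
-- segment tree node: leaf (free-time) | node (size, min free-time, left, right)
inductive Seg where
  | leaf : Int → Seg
  | node : Nat → Int → Seg → Seg → Seg
deriving Repr, DecidableEq

def Seg.minv : Seg → Int
  | .leaf v => v
  | .node _ mn _ _ => mn

def Seg.size : Seg → Nat
  | .leaf _ => 1
  | .node sz _ _ _ => sz

def Seg.build (sz : Nat) : Seg :=
  if h : sz ≤ 1 then .leaf 0
  else .node sz 0 (Seg.build (sz / 2)) (Seg.build (sz - sz / 2))
decreasing_by all_goals omega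

-- _query: index of leftmost leaf with value ≤ t
def Seg.query (t : Int) : Seg → Option Nat
  | .leaf v => if v > t then none else some 0
  | .node _ mn l r =>
    if mn > t then none
    else
      match l.query t with
      | some i => some i
      | none => (r.query t).map (· + l.size)

-- _update: point-update leaf idx to v, recomputing mins on the path
def Seg.update (idx : Nat) (v : Int) : Seg → Seg
  | .leaf _ => .leaf v
  | .node sz _ l r =>
    if idx < l.size then
      let l2 := l.update idx v
      .node sz (min l2.minv r.minv) l2 r
    else
      let r2 := r.update (idx - l.size) v
      .node sz (min l.minv r2.minv) l r2

def loopB (tree : Seg) (arrival : List Int) (burstTime : List Int) (i : Nat) : List Int :=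
  match arrival with
  | [] => []
  | t :: rest =>
    match tree.query t with
    | none => (-1) :: loopB tree rest burstTime (i + 1)
    | some j =>
      let b := (PySem.List.pyGet? burstTime (Int.ofNat i)).getD 0
      (Int.ofNat j) :: loopB (tree.update j (t + b)) rest burstTime (i + 1)

def getServerIndex_alt (n : Int) (arrival : List Int) (burstTime : List Int) : List Int :=
  if n ≤ 0 then arrival.map (fun _ => (-1 : Int))
  else loopB (Seg.build n.toNat) arrival burstTime 0

-- ===== PRECONDITION & SPEC =====
-- Pre_ excludes inputs with n > 0 and arrival longer than burstTime: on those A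
-- raises IndexError the moment a request is assigned at a step past burstTime's end
-- (B raises at the same step); the exact raising set depends on the simulated
-- schedule and has no closed form, so Pre_ conservatively excludes the whole shape —
-- on the excluded inputs where A does return, B returns the SAME value (see cites).
def Pre_getServerIndex (n : Int) (arrival : List Int) (burstTime : List Int) : Prop :=
  n ≤ 0 ∨ arrival.length ≤ burstTime.length
instance (n : Int) (arrival : List Int) (burstTime : List Int) : Decidable (Pre_getServerIndex n arrival burstTime) := by unfold Pre_getServerIndex; infer_instance

def pvWitness_getServerIndex : Int × List Int × List Int := (3, [2, 4, 1, 8, 9], [7, 9, 2, 4, 5])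

def Spec_getServerIndex (n : Int) (arrival : List Int) (burstTime : List Int) (out : List Int) : Prop := out = getServerIndex_alt n arrival burstTime
instance (n : Int) (arrival : List Int) (burstTime : List Int) (out : List Int) : Decidable (Spec_getServerIndex n arrival burstTime out) := by unfold Spec_getServerIndex; infer_instance

-- ===== CLAIM (what is proved, stated in full; the proofs are below) =====
def Claim_equal_getServerIndex : Prop := ∀ (n : Int) (arrival : List Int) (burstTime : List Int), Dom_getServerIndex n arrival burstTime → Pre_getServerIndex n arrival burstTime → Spec_getServerIndex n arrival burstTime (getServerIndex n arrival burstTime)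

-- ===== LEMMAS AND PROOFS =====

-- list-level specification of one assignment step
def lassign (t b : Int) : List Int → Option (Nat × List Int)
  | [] => none
  | s :: rest =>
    if s ≤ t then some (0, (t + b) :: rest)
    else (lassign t b rest).map (fun p => (p.1 + 1, s :: p.2))

def Seg.toList : Seg → List Int
  | .leaf v => [v]
  | .node _ _ l r => l.toList ++ r.toList

def Seg.Valid : Seg → Prop
  | .leaf _ => True
  | .node sz mn l r => sz = l.size + r.size ∧ mn = min l.minv r.minv ∧ l.Valid ∧ r.Valid

theorem innerA_eq_lassign (servers : List Int) (t b : Int) (j : Int) :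
    innerA servers t b j =
      match lassign t b servers with
      | none => (-1, servers)
      | some (i, s') => (j + (i : Int), s') := by
  induction servers generalizing j with
  | nil => simp [innerA, lassign]
  | cons s rest ih =>
    simp only [innerA, lassign]
    by_cases h : s ≤ t
    · simp [h]
    · simp only [h, ih (j + 1)]
      cases hl : lassign t b rest with
      | none => simp
      | some p => cases p; simp; ring

theorem lassign_none_iff (t b : Int) (xs : List Int) :
    lassign t b xs = none ↔ ∀ x ∈ xs, t < x := by
  induction xs with
  | nil => simp [lassign]
  | cons s rest ih =>
    simp only [lassign]
    by_cases h : s ≤ t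
    · simp only [if_pos h, List.mem_cons]
      constructor
      · intro hc; exact absurd hc (by simp)
      · intro H; have := H s (Or.inl rfl); omega
    · simp only [if_neg h, Option.map_eq_none_iff, ih, List.mem_cons]
      constructor
      · rintro H x (rfl | hx)
        · omega
        · exact H x hx
      · intro H x hx; exact H x (Or.inr hx)

theorem lassign_append (t b : Int) (xs ys : List Int) :
    lassign t b (xs ++ ys) =
      match lassign t b xs with
      | some (i, xs') => some (i, xs' ++ ys)
      | none => (lassign t b ys).map (fun p => (p.1 + xs.length, xs ++ p.2)) := by
  induction xs with
  | nil =>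
    cases hy : lassign t b ys with
    | none => simp [lassign, hy]
    | some p => cases p; simp [lassign, hy]
  | cons s rest ih =>
    simp only [List.cons_append, lassign, ih]
    by_cases h : s ≤ t
    · simp [h]
    · simp only [if_neg h]
      cases hl : lassign t b rest with
      | none =>
        cases hy : lassign t b ys with
        | none => simp
        | some p => cases p; simp; ring
      | some p => cases p; simp

theorem valid_size_eq (s : Seg) (hs : s.Valid) : s.size = s.toList.length := by
  induction s with
  | leaf v => simp [Seg.size, Seg.toList]
  | node sz mn l r ihl ihr =>
    obtain ⟨h1, _, hl, hr⟩ := hs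
    simp only [Seg.size, Seg.toList, List.length_append]
    rw [h1, ihl hl, ihr hr]

theorem valid_minv_le (s : Seg) (hs : s.Valid) : ∀ x ∈ s.toList, s.minv ≤ x := by
  induction s with
  | leaf v => simp [Seg.toList, Seg.minv]
  | node sz mn l r ihl ihr =>
    obtain ⟨_, h2, hl, hr⟩ := hs
    intro x hx
    simp only [Seg.toList, List.mem_append] at hx
    rcases hx with hx | hx
    · calc Seg.minv (.node sz mn l r) = min l.minv r.minv := h2
        _ ≤ l.minv := min_le_left _ _
        _ ≤ x := ihl hl x hx
    · calc Seg.minv (.node sz mn l r) = min l.minv r.minv := h2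
        _ ≤ r.minv := min_le_right _ _
        _ ≤ x := ihr hr x hx

theorem query_update_spec (t b : Int) (s : Seg) (hs : s.Valid) :
    (Seg.query t s = none ∧ lassign t b s.toList = none) ∨
    (∃ i, Seg.query t s = some i ∧
      lassign t b s.toList = some (i, (Seg.update i (t + b) s).toList) ∧
      (Seg.update i (t + b) s).Valid ∧ (Seg.update i (t + b) s).size = s.size ∧
      i < s.size) := by
  induction s with
  | leaf v =>
    by_cases h : v ≤ t
    · right
      refine ⟨0, by simp [Seg.query]; omega, ?_, trivial, rfl, by simp [Seg.size]⟩
      simp [lassign, Seg.toList, Seg.update, h]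
    · left
      constructor
      · simp [Seg.query]; omega
      · simp [lassign, Seg.toList, h]
  | node sz mn l r ihl ihr =>
    obtain ⟨h1, h2, hl, hr⟩ := hs
    by_cases hmn : mn > t
    · left
      constructor
      · simp [Seg.query, hmn]
      · rw [lassign_none_iff]
        intro x hx
        have := valid_minv_le (.node sz mn l r) ⟨h1, h2, hl, hr⟩ x (by simpa [Seg.toList] using hx)
        simp only [Seg.minv] at this
        omega
    · rcases ihl hl with ⟨hlq, hll⟩ | ⟨i, hlq, hll, hv2, hsz2, hi2⟩
      · -- left child has no free leaf
        rcases ihr hr with ⟨hrq, hrl⟩ | ⟨i, hrq, hrl, hv2, hsz2, hi2⟩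
        · left
          constructor
          · simp [Seg.query, hmn, hlq, hrq]
          · simp only [Seg.toList, lassign_append, hll, hrl]; rfl
        · right
          have hnotlt : ¬ (i + l.size < l.size) := by omega
          have hsub : i + l.size - l.size = i := by omega
          have hupd : Seg.update (i + l.size) (t + b) (Seg.node sz mn l r) =
              Seg.node sz (min l.minv (Seg.update i (t + b) r).minv) l
                (Seg.update i (t + b) r) := by
            simp only [Seg.update]
            rw [if_neg hnotlt, hsub]
          refine ⟨i + l.size, ?_, ?_, ?_, ?_, ?_⟩
          · simp [Seg.query, hmn, hlq, hrq]
          · rw [hupd]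
            simp only [Seg.toList, lassign_append, hll, hrl, Option.map_some]
            have : i + l.size = i + l.toList.length := by rw [valid_size_eq l hl]
            simp [this]
          · rw [hupd]
            exact ⟨by rw [h1, hsz2], rfl, hl, hv2⟩
          · rw [hupd]; rfl
          · show i + l.size < sz; omega
      · right
        have hupd : Seg.update i (t + b) (Seg.node sz mn l r) =
            Seg.node sz (min (Seg.update i (t + b) l).minv r.minv)
              (Seg.update i (t + b) l) r := by
          simp only [Seg.update]
          rw [if_pos hi2]
        refine ⟨i, ?_, ?_, ?_, ?_, ?_⟩
        · simp [Seg.query, hmn, hlq]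
        · rw [hupd]
          simp only [Seg.toList, lassign_append, hll]
        · rw [hupd]
          exact ⟨by rw [h1, hsz2], rfl, hv2, hr⟩
        · rw [hupd]; rfl
        · show i < sz; omega

theorem loop_eq (arrival : List Int) (burstTime : List Int) (i : Nat)
    (tree : Seg) (hs : tree.Valid) :
    loopB tree arrival burstTime i = loopA tree.toList arrival burstTime i := by
  induction arrival generalizing tree i with
  | nil => simp [loopA, loopB]
  | cons t rest ih =>
    simp only [loopA, loopB]
    rcases query_update_spec t ((PySem.List.pyGet? burstTime (Int.ofNat i)).getD 0) tree hs with
      ⟨hq, hlas⟩ | ⟨j, hq, hlas, hv, _, _⟩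
    · rw [hq, innerA_eq_lassign, hlas]
      exact congrArg _ (ih i.succ tree hs)
    · rw [hq, innerA_eq_lassign, hlas]
      simp only [Int.zero_add]
      exact congrArg _ (ih i.succ _ hv)

theorem build_spec (sz : Nat) (h : 1 ≤ sz) :
    (Seg.build sz).Valid ∧ (Seg.build sz).toList = List.replicate sz 0 ∧
      (Seg.build sz).minv = 0 ∧ (Seg.build sz).size = sz := by
  induction sz using Nat.strong_induction_on with
  | _ sz ih =>
    rw [Seg.build]
    by_cases h1 : sz ≤ 1
    · have : sz = 1 := by omega
      subst this
      simp [Seg.Valid, Seg.toList, Seg.minv, Seg.size, List.replicate]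
    · have hhalf : 1 ≤ sz / 2 ∧ sz / 2 < sz := by omega
      have hrest : 1 ≤ sz - sz / 2 ∧ sz - sz / 2 < sz := by omega
      obtain ⟨v1, t1, m1, s1⟩ := ih (sz / 2) hhalf.2 hhalf.1
      obtain ⟨v2, t2, m2, s2⟩ := ih (sz - sz / 2) hrest.2 hrest.1
      rw [dif_neg h1]
      refine ⟨⟨?_, ?_, v1, v2⟩, ?_, rfl, rfl⟩
      · rw [s1, s2]; omega
      · rw [m1, m2]; simp
      · simp only [Seg.toList, t1, t2]
        rw [← List.replicate_add]
        congr 1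
        omega

theorem loopA_nil (arrival burstTime : List Int) (i : Nat) :
    loopA [] arrival burstTime i = arrival.map (fun _ => (-1 : Int)) := by
  induction arrival generalizing i with
  | nil => simp [loopA]
  | cons t rest ih => simp [loopA, innerA, ih]

-- ===== VERDICT (by name: the statement is the Claim_ definition above) =====
theorem getServerIndex_spec : Claim_equal_getServerIndex := by
  intro n arrival burstTime _ _
  unfold Spec_getServerIndex getServerIndex getServerIndex_alt
  by_cases hn : n ≤ 0
  · have : n.toNat = 0 := Int.toNat_of_nonpos hn
    simp [hn, this, loopA_nil]
  · have h1 : 1 ≤ n.toNat := by omega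
    obtain ⟨hv, htl, _, _⟩ := build_spec n.toNat h1
    simp only [if_neg hn]
    rw [loop_eq _ _ _ _ hv, htl]
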